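-- pv_equiv track=rewrite | github.com/Smanar/Domoticz-deCONZ | fonctions.py | Count_Type
-- ===== SOURCE A (Python) =====
-- def Count_Type(d):
--     b = l = s = g = o = c = 0
--     for i in d:
--         if d[i]['type'] == 'lights':
--             l += 1
--         elif d[i]['type'] == 'sensors':
--             s += 1
--         elif d[i]['type'] == 'groups':
--             g += 1
--         elif d[i]['type'] == 'scenes':
--             c += 1
--         else:
--             o += 1
--
--         if d[i].get('state','unknow') == 'banned':
--             b += 1
--     return l,s,g,b,o,c
-- ===== SOURCE B (Python) =====
-- def Count_Type(d):
--     # One histogram pass over the types, then extract the four named buckets;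
--     # 'other' is derived arithmetically; banned counted in a separate pass.
--     types = {}
--     for i in d:
--         t = d[i]['type']
--         types[t] = types.get(t, 0) + 1
--     l = types.get('lights', 0)
--     s = types.get('sensors', 0)
--     g = types.get('groups', 0)
--     c = types.get('scenes', 0)
--     o = len(d) - l - s - g - c
--     b = sum(1 for i in d if d[i].get('state', 'unknow') == 'banned')
--     return l, s, g, b, o, c
-- ===== Notes on version B (the rewrite author's own statement) =====
-- stated objective: alternative
-- what changed: Replaces the six-accumulator if/elif chain by a single histogram (dict of type counts) from which the four named buckets are read off, derives 'other' as len(d) minus those buckets, and counts 'banned' in a separate generator pass.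
import Mathlib
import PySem

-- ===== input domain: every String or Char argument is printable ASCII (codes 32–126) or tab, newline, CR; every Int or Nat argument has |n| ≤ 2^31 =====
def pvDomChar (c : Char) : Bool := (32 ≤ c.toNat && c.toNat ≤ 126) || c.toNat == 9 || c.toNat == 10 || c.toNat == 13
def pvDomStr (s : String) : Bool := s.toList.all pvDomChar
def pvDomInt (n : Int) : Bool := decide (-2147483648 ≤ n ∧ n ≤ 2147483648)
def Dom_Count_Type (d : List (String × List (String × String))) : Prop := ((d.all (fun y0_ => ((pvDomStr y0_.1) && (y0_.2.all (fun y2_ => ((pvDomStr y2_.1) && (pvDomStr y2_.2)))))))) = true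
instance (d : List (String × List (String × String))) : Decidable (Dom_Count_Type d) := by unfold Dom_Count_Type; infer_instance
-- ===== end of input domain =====

-- B replaces A's six-accumulator if/elif chain by a type histogram (dict) read off at the
-- end, derives 'other' as len(d) minus the four named buckets, and counts 'banned' in a
-- separate pass (objective: alternative decomposition, same O(n) cost).

-- ===== PORT A =====
-- A's loop body (if/elif chain updating the six counters, then the banned check).
def pvStepA (d : List (String × List (String × String)))
    (st : Int × Int × Int × Int × Int × Int) (kv : String × List (String × String)) :
    Int × Int × Int × Int × Int × Int :=
  match st with
  | (b, l, s, g, o, c) =>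
    let di := ((PySem.Dict.mk d).get? kv.1).getD []        -- d[i]
    let t := ((PySem.Dict.mk di).get? "type").getD ""      -- d[i]['type'] (Pre_: key present)
    let st' :=
      if t == "lights" then (b, l + 1, s, g, o, c)
      else if t == "sensors" then (b, l, s + 1, g, o, c)
      else if t == "groups" then (b, l, s, g + 1, o, c)
      else if t == "scenes" then (b, l, s, g, o, c + 1)
      else (b, l, s, g, o + 1, c)
    match st' with
    | (b, l, s, g, o, c) =>
      if (PySem.Dict.mk di).getD "state" "unknow" == "banned" then (b + 1, l, s, g, o, c)
      else (b, l, s, g, o, c)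

def Count_Type (d : List (String × List (String × String))) : Int × Int × Int × Int × Int × Int :=
  let st := d.foldl (pvStepA d) (0, 0, 0, 0, 0, 0)
  (st.2.1, st.2.2.1, st.2.2.2.1, st.1, st.2.2.2.2.1, st.2.2.2.2.2)

-- ===== PORT B =====
-- t = d[i]['type'] as B's histogram loop computes it
def pvTypeOfB (d : List (String × List (String × String))) (kv : String × List (String × String)) : String :=
  ((PySem.Dict.mk (((PySem.Dict.mk d).get? kv.1).getD [])).get? "type").getD ""

def Count_Type_alt (d : List (String × List (String × String))) : Int × Int × Int × Int × Int × Int :=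
  let types := d.foldl (fun (m : PySem.Dict String Int) kv =>
      m.insert (pvTypeOfB d kv) (m.getD (pvTypeOfB d kv) 0 + 1)) PySem.Dict.empty
  let l := types.getD "lights" 0
  let s := types.getD "sensors" 0
  let g := types.getD "groups" 0
  let c := types.getD "scenes" 0
  let o := (d.length : Int) - l - s - g - c
  let b := ((d.filter (fun kv =>
      (PySem.Dict.mk (((PySem.Dict.mk d).get? kv.1).getD [])).getD "state" "unknow" == "banned")).length : Int)
  (l, s, g, b, o, c)

-- ===== PRECONDITION & SPEC =====
-- Pre_ excludes (a) entries whose inner dict has no 'type' key: there Python A raises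
-- KeyError; (b) association lists with duplicate outer or inner keys, which have no
-- faithful Python-dict counterpart (Python dicts collapse duplicates).
def Pre_Count_Type (d : List (String × List (String × String))) : Prop :=
  (d.map Prod.fst).Nodup ∧
  ∀ p ∈ d, (p.2.map Prod.fst).Nodup ∧ "type" ∈ p.2.map Prod.fst
instance (d : List (String × List (String × String))) : Decidable (Pre_Count_Type d) := by
  unfold Pre_Count_Type; infer_instance

def pvWitness_Count_Type : (List (String × List (String × String))) :=
  [("a", [("type", "lights"), ("state", "banned")]), ("b", [("type", "foo")])]

def Spec_Count_Type (d : List (String × List (String × String))) (out : Int × Int × Int × Int × Int × Int) : Prop := out = Count_Type_alt d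
instance (d : List (String × List (String × String))) (out : Int × Int × Int × Int × Int × Int) : Decidable (Spec_Count_Type d out) := by unfold Spec_Count_Type; infer_instance

-- ===== CLAIM (what is proved, stated in full; the proofs are below) =====
def Claim_equal_Count_Type : Prop := ∀ (d : List (String × List (String × String))), Dom_Count_Type d → Pre_Count_Type d → Spec_Count_Type d (Count_Type d)

-- ===== LEMMAS AND PROOFS =====

-- the banned test, shared shape of both ports' expressions
def pvBanned (d : List (String × List (String × String))) (kv : String × List (String × String)) : Bool :=
  (PySem.Dict.mk (((PySem.Dict.mk d).get? kv.1).getD [])).getD "state" "unknow" == "banned"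

-- characterisation of A's fold: each component adds the count of its predicate
lemma foldA_char (d : List (String × List (String × String)))
    (xs : List (String × List (String × String))) (b l s g o c : Int) :
    xs.foldl (pvStepA d) (b, l, s, g, o, c) =
      (b + (xs.countP (pvBanned d) : Int),
       l + (xs.countP (fun kv => pvTypeOfB d kv == "lights") : Int),
       s + (xs.countP (fun kv => pvTypeOfB d kv == "sensors") : Int),
       g + (xs.countP (fun kv => pvTypeOfB d kv == "groups") : Int),
       o + (xs.countP (fun kv => !(pvTypeOfB d kv == "lights") && !(pvTypeOfB d kv == "sensors")
              && !(pvTypeOfB d kv == "groups") && !(pvTypeOfB d kv == "scenes")) : Int),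
       c + (xs.countP (fun kv => pvTypeOfB d kv == "scenes") : Int)) := by
  induction xs generalizing b l s g o c with
  | nil => simp
  | cons x xs ih =>
    simp only [List.foldl_cons, List.countP_cons]
    have hstep : pvStepA d (b, l, s, g, o, c) x =
        (b + (if pvBanned d x then 1 else 0),
         l + (if pvTypeOfB d x == "lights" then 1 else 0),
         s + (if pvTypeOfB d x == "sensors" then 1 else 0),
         g + (if pvTypeOfB d x == "groups" then 1 else 0),
         o + (if !(pvTypeOfB d x == "lights") && !(pvTypeOfB d x == "sensors")
                && !(pvTypeOfB d x == "groups") && !(pvTypeOfB d x == "scenes") then 1 else 0),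
         c + (if pvTypeOfB d x == "scenes" then 1 else 0)) := by
      simp only [pvStepA, pvTypeOfB, pvBanned]
      split_ifs <;> simp_all
    rw [hstep, ih]
    refine Prod.ext ?_ (Prod.ext ?_ (Prod.ext ?_ (Prod.ext ?_ (Prod.ext ?_ ?_)))) <;>
      simp <;> split_ifs <;> ring

-- the five buckets partition the list: other = length - the four named counts
lemma countP_other (d : List (String × List (String × String)))
    (xs : List (String × List (String × String))) :
    (xs.countP (fun kv => !(pvTypeOfB d kv == "lights") && !(pvTypeOfB d kv == "sensors")
        && !(pvTypeOfB d kv == "groups") && !(pvTypeOfB d kv == "scenes")) : Int) =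
      (xs.length : Int)
      - (xs.countP (fun kv => pvTypeOfB d kv == "lights") : Int)
      - (xs.countP (fun kv => pvTypeOfB d kv == "sensors") : Int)
      - (xs.countP (fun kv => pvTypeOfB d kv == "groups") : Int)
      - (xs.countP (fun kv => pvTypeOfB d kv == "scenes") : Int) := by
  induction xs with
  | nil => simp
  | cons x xs ih =>
    simp only [List.countP_cons, List.length_cons]
    by_cases h1 : pvTypeOfB d x == "lights" <;>
      by_cases h2 : pvTypeOfB d x == "sensors" <;>
        by_cases h3 : pvTypeOfB d x == "groups" <;>
          by_cases h4 : pvTypeOfB d x == "scenes" <;>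
            simp_all <;> omega

-- B's histogram lookup is a countP
lemma hist_getD (d : List (String × List (String × String))) (v : String) :
    (d.foldl (fun (m : PySem.Dict String Int) kv =>
        m.insert (pvTypeOfB d kv) (m.getD (pvTypeOfB d kv) 0 + 1)) PySem.Dict.empty).getD v 0 =
      (d.countP (fun kv => pvTypeOfB d kv == v) : Int) := by
  show (List.foldl (fun (m : PySem.Dict String Int) kv =>
        (fun (m : PySem.Dict String Int) t => m.insert t (m.getD t 0 + 1)) m (pvTypeOfB d kv))
      PySem.Dict.empty d).getD v 0 = _
  rw [← List.foldl_map (f := pvTypeOfB d)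
        (g := fun (m : PySem.Dict String Int) t => m.insert t (m.getD t 0 + 1))
        (l := d) (init := PySem.Dict.empty),
      PySem.Dict.getD_foldl_insert_add_one]
  simp [List.count_eq_countP, List.countP_map, Function.comp_def]

-- ===== VERDICT (by name: the statement is the Claim_ definition above) =====
theorem Count_Type_spec : Claim_equal_Count_Type := by
  intro d _ _
  show Count_Type d = Count_Type_alt d
  simp only [Count_Type, Count_Type_alt, foldA_char, hist_getD, countP_other]
  have hb : (fun kv => (PySem.Dict.mk (((PySem.Dict.mk d).get? kv.1).getD [])).getD "state" "unknow" == "banned") = pvBanned d := rfl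
  simp [List.countP_eq_length_filter, hb]
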